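-- pv_equiv track=rewrite | github.com/pypi-data/pypi-mirror-325 | packages/formula_detection/formula_detection-0.4.1.tar.gz/formula_detection-0.4.1/formula_detection/context.py | construct_dominant_phrases
-- ===== SOURCE A (Python) =====
-- from typing import Dict, Iterable, List, Set, Union
--
-- def construct_dominant_phrases(phrase: str, dominant_terms: List[str]) -> List[str]:
--     dominant_phrases = []
--     for dominant_term in dominant_terms:
--         variable_terms = dominant_term.split(' ')
--         dominant_phrase = phrase
--         for variable_term in variable_terms:
--             dominant_phrase = dominant_phrase.replace('<VAR>', variable_term, 1)
--         dominant_phrases.append(dominant_phrase)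
--     return dominant_phrases
-- ===== SOURCE B (Python) =====
-- def construct_dominant_phrases(phrase, dominant_terms):
--     parts = phrase.split('<VAR>')
--     head, gaps = parts[0], parts[1:]
--     results = []
--     for term in dominant_terms:
--         words = term.split(' ')
--         pieces = [head]
--         for i, gap in enumerate(gaps):
--             pieces.append(words[i] if i < len(words) else '<VAR>')
--             pieces.append(gap)
--         results.append(''.join(pieces))
--     return results
-- ===== Notes on version B (the rewrite author's own statement) =====
-- stated objective: alternative
-- what changed: B splits the phrase at '<VAR>' once and, per dominant term, rebuilds the result in a single interleaving pass over the parts (word i fills gap i, leftover gaps keep the literal '<VAR>'), instead of A's repeated leftmost-scan replace('<VAR>', word, 1) per word.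
-- outside the precondition, e.g. on construct_dominant_phrases('x <VAR> y', ['<VAR> b']): A returns ['x b y'], B returns ['x <VAR> y']
import Mathlib
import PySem

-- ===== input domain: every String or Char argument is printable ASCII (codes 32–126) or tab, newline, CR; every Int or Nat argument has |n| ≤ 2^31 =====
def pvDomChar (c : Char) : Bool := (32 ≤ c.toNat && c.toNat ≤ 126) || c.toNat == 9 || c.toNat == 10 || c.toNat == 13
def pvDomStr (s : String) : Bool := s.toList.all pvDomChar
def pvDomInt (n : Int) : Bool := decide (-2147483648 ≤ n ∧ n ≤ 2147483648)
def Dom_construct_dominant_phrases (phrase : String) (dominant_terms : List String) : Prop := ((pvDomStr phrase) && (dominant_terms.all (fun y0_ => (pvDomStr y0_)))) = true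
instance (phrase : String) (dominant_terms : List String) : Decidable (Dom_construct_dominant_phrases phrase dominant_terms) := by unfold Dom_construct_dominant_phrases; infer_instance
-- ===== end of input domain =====

-- B fills the placeholders by splitting the phrase at '<VAR>' once and interleaving each term's
-- words with the parts in one pass, instead of A's repeated leftmost-scan replace (objective:
-- alternative; same cost on these inputs).

-- the placeholder '<VAR>' as a character list (both Pythons' literal '<VAR>')
def pvVAR : List Char := ['<', 'V', 'A', 'R', '>']

-- ===== PORT A =====
-- hand port of Python's s.replace(old, new, 1) (count = 1, not covered by PySem.Chars.replace):
-- splice `new` over the leftmost occurrence of `old` located by PySem.Chars.find; exact (for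
-- old = '' Python inserts once at the front, which this also does since find s [] = 0).
def pvReplace1 (s old new : List Char) : List Char :=
  let i := PySem.Chars.find s old
  if i = -1 then s else s.take i.toNat ++ new ++ s.drop (i.toNat + old.length)

def construct_dominant_phrases (phrase : String) (dominant_terms : List String) : List String :=
  dominant_terms.foldl
    (fun dominant_phrases dominant_term =>
      let variable_terms := PySem.Chars.splitOn dominant_term.toList [' ']
      let dominant_phrase :=
        variable_terms.foldl (fun dp variable_term => pvReplace1 dp pvVAR variable_term) phrase.toList
      dominant_phrases ++ [String.ofList dominant_phrase]) []

-- ===== PORT B =====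
-- the interleaving loop of Source B: walk the gaps (parts after the first) with the running word
-- index, consuming one word per gap; when the words run out the literal '<VAR>' is re-inserted.
def pvFill : List (List Char) → List (List Char) → List Char
  | [], _ => []
  | gap :: gaps, [] => pvVAR ++ gap ++ pvFill gaps []
  | gap :: gaps, w :: ws => w ++ gap ++ pvFill gaps ws

-- Source B's parts[0] / parts[1:] : str.split always returns a nonempty list, so headI/tail are exact
def construct_dominant_phrases_alt (phrase : String) (dominant_terms : List String) : List String :=
  let parts := PySem.Chars.splitOn phrase.toList pvVAR
  dominant_terms.map (fun term =>
    let words := PySem.Chars.splitOn term.toList [' ']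
    String.ofList (parts.headI ++ pvFill parts.tail words))

-- ===== PRECONDITION & SPEC =====
-- a word is safe when no occurrence of '<VAR>' can overlap it once inserted: it does not contain
-- '<VAR>', is not a substring of '<VAR>', no nonempty proper prefix of '<VAR>' is a suffix of the
-- word and no nonempty proper suffix of '<VAR>' is a prefix of the word
def pvSafeWord (w : List Char) : Bool :=
  !PySem.Chars.isIn pvVAR w && !PySem.Chars.isIn w pvVAR &&
  !List.isSuffixOf ['<'] w && !List.isSuffixOf ['<', 'V'] w &&
  !List.isSuffixOf ['<', 'V', 'A'] w && !List.isSuffixOf ['<', 'V', 'A', 'R'] w &&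
  !List.isPrefixOf ['>'] w && !List.isPrefixOf ['R', '>'] w &&
  !List.isPrefixOf ['A', 'R', '>'] w && !List.isPrefixOf ['V', 'A', 'R', '>'] w

-- Pre_ excludes inputs where a space-separated word of a dominant term that is actually inserted
-- (its position still has a '<VAR>' gap in the phrase) and is followed by a further word overlaps
-- the placeholder '<VAR>' (contains it, is a substring of it, or borders it): there A's sequential
-- replace may fill a placeholder completed by its own earlier insertion, a corner where neither
-- behaviour is specified.
def Pre_construct_dominant_phrases (phrase : String) (dominant_terms : List String) : Prop :=
  ∀ term ∈ dominant_terms,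
    ∀ w ∈ (PySem.Chars.splitOn term.toList [' ']).dropLast.take
        ((PySem.Chars.splitOn phrase.toList pvVAR).length - 1), pvSafeWord w = true

instance (phrase : String) (dominant_terms : List String) : Decidable (Pre_construct_dominant_phrases phrase dominant_terms) := by unfold Pre_construct_dominant_phrases; infer_instance

def pvWitness_construct_dominant_phrases : String × List String :=
  ("a <VAR> b <VAR>!", ["x yy", "z"])

def Spec_construct_dominant_phrases (phrase : String) (dominant_terms : List String) (out : List String) : Prop := out = construct_dominant_phrases_alt phrase dominant_terms
instance (phrase : String) (dominant_terms : List String) (out : List String) : Decidable (Spec_construct_dominant_phrases phrase dominant_terms out) := by unfold Spec_construct_dominant_phrases; infer_instance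

-- ===== CLAIM (what is proved, stated in full; the proofs are below) =====
def Claim_equal_construct_dominant_phrases : Prop := ∀ (phrase : String) (dominant_terms : List String), Dom_construct_dominant_phrases phrase dominant_terms → Pre_construct_dominant_phrases phrase dominant_terms → Spec_construct_dominant_phrases phrase dominant_terms (construct_dominant_phrases phrase dominant_terms)

-- ===== LEMMAS AND PROOFS =====

-- propositional restatement of pvSafeWord, the form the gluing lemma destructures
def pvSafeWordP (w : List Char) : Prop :=
  ¬ w <:+: pvVAR ∧ ¬ pvVAR <:+: w ∧
  ¬ ['<'] <:+ w ∧ ¬ ['<', 'V'] <:+ w ∧ ¬ ['<', 'V', 'A'] <:+ w ∧ ¬ ['<', 'V', 'A', 'R'] <:+ w ∧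
  ¬ ['>'] <+: w ∧ ¬ ['R', '>'] <+: w ∧ ¬ ['A', 'R', '>'] <+: w ∧ ¬ ['V', 'A', 'R', '>'] <+: w

theorem pv_safeWord_prop {w : List Char} (h : pvSafeWord w = true) : pvSafeWordP w := by
  simp only [pvSafeWord, Bool.and_eq_true, Bool.not_eq_true',
    PySem.Chars.isIn_eq_false_iff] at h
  obtain ⟨⟨⟨⟨⟨⟨⟨⟨⟨h1, h2⟩, h3⟩, h4⟩, h5⟩, h6⟩, h7⟩, h8⟩, h9⟩, h10⟩ := h
  refine ⟨h2, h1, ?_, ?_, ?_, ?_, ?_, ?_, ?_, ?_⟩ <;>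
    simp only [← List.isSuffixOf_iff_suffix, ← List.isPrefixOf_iff_prefix] <;>
    simp_all

theorem pv_no_border (t : List Char) (hp : t <+: pvVAR) (hs : t <:+ pvVAR)
    (hne : t ≠ []) (hlt : t.length < 5) : False := by
  have ht : t = pvVAR.take t.length := by obtain ⟨u, hu⟩ := hp; rw [← hu]; simp
  have h1 : 1 ≤ t.length := by cases t with | nil => simp at hne | cons a l => simp
  have h14 : t.length = 1 ∨ t.length = 2 ∨ t.length = 3 ∨ t.length = 4 := by omega
  rcases h14 with h | h | h | h <;> rw [h] at ht <;> rw [ht] at hs <;> revert hs <;> decide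

theorem pv_infix_append_cases {t x y : List Char} (h : t <:+: x ++ y) :
    t <:+: x ∨ t <:+: y ∨
      ∃ t₁ t₂, t₁ ++ t₂ = t ∧ t₁ ≠ [] ∧ t₂ ≠ [] ∧ t₁ <:+ x ∧ t₂ <+: y := by
  induction x with
  | nil => simp at h; exact Or.inr (Or.inl h)
  | cons a x ih =>
    rw [List.cons_append] at h
    rcases List.infix_cons_iff.mp h with hpre | hinf
    · by_cases hl : t.length ≤ (a :: x).length
      · left
        have : t <+: (a :: x) ++ y := by simpa using hpre
        exact ((List.isPrefix_append_of_length hl).mp this).isInfix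
      · have hpre' : t <+: (a :: x) ++ y := by simpa using hpre
        have hax : (a :: x) <+: t := by
          rcases List.prefix_or_prefix_of_prefix hpre' (List.prefix_append (a :: x) y) with h1 | h1
          · exact absurd h1.length_le (by omega)
          · exact h1
        obtain ⟨t₂, ht₂⟩ := hax
        right; right
        refine ⟨a :: x, t₂, ht₂, by simp, ?_, List.suffix_refl _, ?_⟩
        · rintro rfl
          rw [List.append_nil] at ht₂
          exact hl (ht₂ ▸ le_rfl)
        · have : (a :: x) ++ t₂ <+: (a :: x) ++ y := ht₂ ▸ hpre'
          exact (List.prefix_append_right_inj (a :: x)).mp this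
    · rcases ih hinf with h1 | h1 | ⟨t₁, t₂, he, hn1, hn2, hsuf, hy⟩
      · exact Or.inl (h1.trans (List.suffix_cons a x).isInfix)
      · exact Or.inr (Or.inl h1)
      · exact Or.inr (Or.inr ⟨t₁, t₂, he, hn1, hn2, hsuf.trans (List.suffix_cons a x), hy⟩)

theorem pv_safe_glue {p q w : List Char} (hp : ¬ pvVAR <:+: p) (hq : ¬ pvVAR <:+: q)
    (hw : pvSafeWordP w) : ¬ pvVAR <:+: (p ++ w ++ q) := by
  obtain ⟨hw1, hw2, hs1, hs2, hs3, hs4, hp1, hp2, hp3, hp4⟩ := hw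
  intro h
  have h' : pvVAR <:+: p ++ (w ++ q) := by simpa [List.append_assoc] using h
  rcases pv_infix_append_cases h' with h0 | h0 | ⟨t₁, t₂, he, hn1, hn2, hsuf, hpre⟩
  · exact hp h0
  · rcases pv_infix_append_cases h0 with h1 | h1 | ⟨t₁, t₂, he, hn1, hn2, hsuf, hpre⟩
    · exact hw2 h1
    · exact hq h1
    · have hlen : t₁.length + t₂.length = 5 := by
        have := congrArg List.length he; simpa [pvVAR] using this
      have ht₁ : t₁ = pvVAR.take t₁.length := by rw [← he]; simp
      have hn1' : 1 ≤ t₁.length := by cases t₁ with | nil => simp at hn1 | cons a l => simp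
      have hn2' : t₁.length ≤ 4 := by
        have : 1 ≤ t₂.length := by cases t₂ with | nil => simp at hn2 | cons a l => simp
        omega
      have h14 : t₁.length = 1 ∨ t₁.length = 2 ∨ t₁.length = 3 ∨ t₁.length = 4 := by omega
      rcases h14 with hh | hh | hh | hh <;> rw [hh] at ht₁ <;>
        simp only [pvVAR, List.take] at ht₁ <;> subst ht₁
      · exact hs1 hsuf
      · exact hs2 hsuf
      · exact hs3 hsuf
      · exact hs4 hsuf
  · have hlen : t₁.length + t₂.length = 5 := by
      have := congrArg List.length he; simpa [pvVAR] using this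
    have hn1' : 1 ≤ t₁.length := by cases t₁ with | nil => simp at hn1 | cons a l => simp
    have hn2' : 1 ≤ t₂.length := by cases t₂ with | nil => simp at hn2 | cons a l => simp
    have ht₂ : t₂ = pvVAR.drop t₁.length := by rw [← he]; simp
    rcases List.prefix_or_prefix_of_prefix hpre (List.prefix_append w q) with h1 | h1
    · have h14 : t₁.length = 1 ∨ t₁.length = 2 ∨ t₁.length = 3 ∨ t₁.length = 4 := by omega
      rcases h14 with hh | hh | hh | hh <;> rw [hh] at ht₂ <;>
        simp only [pvVAR, List.drop] at ht₂ <;> subst ht₂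
      · exact hp4 h1
      · exact hp3 h1
      · exact hp2 h1
      · exact hp1 h1
    · exact hw1 (h1.isInfix.trans (ht₂ ▸ (List.drop_suffix t₁.length pvVAR).isInfix))

theorem pv_find_marker {p r : List Char} (hp : ¬ pvVAR <:+: p) :
    PySem.Chars.find (p ++ pvVAR ++ r) pvVAR = (p.length : Int) := by
  have hsplit : p ++ pvVAR ++ r = p ++ (pvVAR ++ r) := by simp [List.append_assoc]
  have hocc : pvVAR <+: (p ++ pvVAR ++ r).drop p.length := by
    rw [hsplit, List.drop_left]; exact List.prefix_append _ _
  have hinf : pvVAR <:+: p ++ pvVAR ++ r :=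
    hocc.isInfix.trans (List.drop_suffix _ _).isInfix
  have h0 : 0 ≤ PySem.Chars.find (p ++ pvVAR ++ r) pvVAR :=
    (PySem.Chars.find_nonneg_iff _ _).mpr hinf
  obtain ⟨hj1, hj2⟩ := PySem.Chars.find_spec h0
  set j := (PySem.Chars.find (p ++ pvVAR ++ r) pvVAR).toNat with hjdef
  have hle : j ≤ p.length := by
    by_contra hgt
    exact hj2 p.length (by omega) hocc
  have hnotlt : ¬ j < p.length := by
    intro hlt
    rw [hsplit, List.drop_append_of_le_length (by omega)] at hj1
    set X := p.drop j with hX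
    have hXne : X ≠ [] := by
      simp [hX, List.drop_eq_nil_iff]
      omega
    have hX1 : 1 ≤ X.length := by
      cases hx : X with
      | nil => exact absurd hx hXne
      | cons a l => simp
    by_cases hX5 : 5 ≤ X.length
    · have : pvVAR <+: X := by
        have : pvVAR <+: X ++ (pvVAR ++ r) := hj1
        exact (List.isPrefix_append_of_length (by simpa [pvVAR] using hX5)).mp this
      exact hp (this.isInfix.trans (List.drop_suffix _ _).isInfix)
    · have hXpre : X <+: pvVAR := by
        rcases List.prefix_or_prefix_of_prefix hj1 (List.prefix_append X (pvVAR ++ r)) with h1 | h1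
        · exact absurd h1.length_le (by simp [pvVAR]; omega)
        · exact h1
      have hXeq : X = pvVAR.take X.length := by
        obtain ⟨u, hu⟩ := hXpre; rw [← hu]; simp
      have htdef : pvVAR = X ++ pvVAR.drop X.length := by
        conv_lhs => rw [← List.take_append_drop X.length pvVAR, ← hXeq]
      set t := pvVAR.drop X.length with ht
      have htpre : t <+: pvVAR := by
        have h1 : X ++ t <+: X ++ (pvVAR ++ r) := htdef ▸ hj1
        have h2 : t <+: pvVAR ++ r := (List.prefix_append_right_inj X).mp h1
        exact (List.isPrefix_append_of_length (by simp [ht, pvVAR])).mp h2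
      have htsuf : t <:+ pvVAR := List.drop_suffix _ _
      have htne : t ≠ [] := by
        simp [ht, List.drop_eq_nil_iff, pvVAR]
        omega
      have htlt : t.length < 5 := by
        simp [ht, pvVAR]
        omega
      exact pv_no_border t htpre htsuf htne htlt
  have hjeq : j = p.length := by omega
  omega

theorem pv_replace1_no {s w : List Char} (hs : ¬ pvVAR <:+: s) : pvReplace1 s pvVAR w = s := by
  have : PySem.Chars.find s pvVAR = -1 := (PySem.Chars.find_eq_neg_one_iff _ _).mpr hs
  simp [pvReplace1, this]

theorem pv_replace1_step {p r w : List Char} (hp : ¬ pvVAR <:+: p) :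
    pvReplace1 (p ++ pvVAR ++ r) pvVAR w = p ++ w ++ r := by
  have hf : PySem.Chars.find (p ++ (pvVAR ++ r)) pvVAR = (p.length : Int) := by
    rw [← List.append_assoc]; exact pv_find_marker hp
  have h1 : (p ++ (pvVAR ++ r)).take p.length = p := List.take_left
  have h2 : (p ++ (pvVAR ++ r)).drop (p.length + pvVAR.length) = r := by
    rw [← List.append_assoc]
    have hl : p.length + pvVAR.length = (p ++ pvVAR).length := by simp
    rw [hl, List.drop_left]
  have hne : ¬ ((p.length : Int) = -1) := by omega
  simp [pvReplace1, hf, hne, Int.toNat_natCast, h1, h2]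

def pvSp : List Char → List (List Char)
  | [] => [[]]
  | c :: rest =>
    if pvVAR.isPrefixOf (c :: rest) then [] :: pvSp ((c :: rest).drop 5)
    else
      match pvSp rest with
      | [] => [[c]]
      | h :: t => (c :: h) :: t
  termination_by l => l.length
  decreasing_by all_goals simp [List.length_drop]

theorem pv_sp_ne_nil (l : List Char) : pvSp l ≠ [] := by
  cases l with
  | nil => simp [pvSp]
  | cons c rest =>
    rw [pvSp]
    split
    · simp
    · rcases pvSp rest with _ | ⟨h, t⟩ <;> simp

theorem pv_go_eq_sp (fuel : Nat) : ∀ (l cur : List Char) (acc : List (List Char)),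
    l.length < fuel →
    PySem.Chars.splitOn.go pvVAR fuel l cur acc
      = acc.reverse ++ (cur.reverse ++ (pvSp l).headI) :: (pvSp l).tail := by
  induction fuel with
  | zero => intro l cur acc h; omega
  | succ fuel ih =>
    intro l cur acc h
    cases l with
    | nil => simp [PySem.Chars.splitOn.go, pvSp]
    | cons c rest =>
      by_cases hpre : pvVAR.isPrefixOf (c :: rest)
      · have hlen5 : 5 ≤ (c :: rest).length := by
          have := (List.isPrefixOf_iff_prefix.mp hpre).length_le
          simpa [pvVAR] using this
        have hstep : PySem.Chars.splitOn.go pvVAR (fuel + 1) (c :: rest) cur acc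
            = PySem.Chars.splitOn.go pvVAR fuel ((c :: rest).drop pvVAR.length) []
                (cur.reverse :: acc) := by
          simp [PySem.Chars.splitOn.go, hpre]
        rw [hstep, ih _ _ _ (by simp [pvVAR] at h ⊢; omega)]
        obtain ⟨hh, tt, hP⟩ := List.exists_cons_of_ne_nil (pv_sp_ne_nil (rest.drop 4))
        rw [pvSp, if_pos hpre]
        simp [pvVAR, hP]
      · have hstep : PySem.Chars.splitOn.go pvVAR (fuel + 1) (c :: rest) cur acc
            = PySem.Chars.splitOn.go pvVAR fuel rest (c :: cur) acc := by
          simp [PySem.Chars.splitOn.go, hpre]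
        rw [hstep, ih _ _ _ (by simp at h ⊢; omega)]
        obtain ⟨hh, tt, hP⟩ := List.exists_cons_of_ne_nil (pv_sp_ne_nil rest)
        rw [pvSp, if_neg hpre, hP]
        simp

theorem pv_splitOn_eq_sp (s : List Char) : PySem.Chars.splitOn s pvVAR = pvSp s := by
  obtain ⟨h, t, hP⟩ := List.exists_cons_of_ne_nil (pv_sp_ne_nil s)
  rw [PySem.Chars.splitOn, pv_go_eq_sp (s.length + 1) s [] [] (by omega)]
  simp [hP]

def pvGlue : List (List Char) → List Char
  | [] => []
  | [p] => p
  | p :: ps => p ++ pvVAR ++ pvGlue ps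

theorem pv_glue_cons₂ (p₀ p₁ : List Char) (rest : List (List Char)) :
    pvGlue (p₀ :: p₁ :: rest) = p₀ ++ pvVAR ++ pvGlue (p₁ :: rest) := rfl

theorem pv_glue_cons_head (c : Char) (h : List Char) (t : List (List Char)) :
    pvGlue ((c :: h) :: t) = c :: pvGlue (h :: t) := by
  cases t <;> simp [pvGlue]

theorem pv_sp_spec (l : List Char) :
    pvGlue (pvSp l) = l ∧ (∀ p ∈ pvSp l, ¬ pvVAR <:+: p) ∧ (pvSp l).headI <+: l := by
  fun_induction pvSp l with
  | case1 =>
    refine ⟨rfl, ?_, by simp⟩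
    intro p hp
    simp at hp
    subst hp
    simp [pvVAR]
  | case2 c rest hpre ih =>
    obtain ⟨ihg, ihf, ihh⟩ := ih
    obtain ⟨h, t, hP⟩ := List.exists_cons_of_ne_nil (pv_sp_ne_nil ((c :: rest).drop 5))
    have hdec : c :: rest = pvVAR ++ (c :: rest).drop 5 := by
      obtain ⟨u, hu⟩ := List.isPrefixOf_iff_prefix.mp hpre
      conv_lhs => rw [← hu]
      simp [pvVAR, ← hu]
    refine ⟨?_, ?_, by simp⟩
    · rw [hP, pv_glue_cons₂]
      rw [hP] at ihg
      rw [ihg]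
      conv_rhs => rw [hdec]
      simp
    · intro p hp
      rcases List.mem_cons.mp hp with rfl | hp'
      · simp [pvVAR]
      · exact ihf p hp'
  | case3 c rest hpre hx ih => exact absurd hx (pv_sp_ne_nil rest)
  | case4 c rest hpre h t hP ih =>
    obtain ⟨ihg, ihf, ihh⟩ := ih
    rw [hP] at ihg ihf ihh
    simp only [List.headI_cons] at ihh
    have hch : (c :: h) <+: (c :: rest) := by
      obtain ⟨u, hu⟩ := ihh
      exact ⟨u, by simp [hu]⟩
    refine ⟨?_, ?_, by simpa using hch⟩
    · rw [pv_glue_cons_head, ihg]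
    · intro p hp
      rcases List.mem_cons.mp hp with rfl | hp'
      · intro hinf
        rcases List.infix_cons_iff.mp hinf with hpr | hinf'
        · exact absurd (List.isPrefixOf_iff_prefix.mpr (hpr.trans hch)) (by simpa using hpre)
        · exact ihf h (by simp) hinf'
      · exact ihf p (List.mem_cons_of_mem _ hp')

theorem pv_glue_fill (ps : List (List Char)) : ∀ p, pvGlue (p :: ps) = p ++ pvFill ps [] := by
  induction ps with
  | nil => intro p; simp [pvGlue, pvFill]
  | cons q qs ih => intro p; rw [pv_glue_cons₂, ih q]; simp [pvFill]

theorem pv_fold_eq (ws : List (List Char)) :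
    ∀ P : List (List Char), (∀ p ∈ P, ¬ pvVAR <:+: p) → P ≠ [] →
      (∀ w ∈ ws.dropLast.take (P.length - 1), pvSafeWordP w) →
      ws.foldl (fun dp vt => pvReplace1 dp pvVAR vt) (pvGlue P) = P.headI ++ pvFill P.tail ws := by
  induction ws with
  | nil =>
    intro P hfree hne _
    obtain ⟨p, ps, rfl⟩ := List.exists_cons_of_ne_nil hne
    simpa using pv_glue_fill ps p
  | cons w ws ih =>
    intro P hfree hne hsafe
    obtain ⟨p₀, ps, rfl⟩ := List.exists_cons_of_ne_nil hne
    cases ps with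
    | nil =>
      simp only [List.foldl_cons]
      have hg1 : pvGlue [p₀] = p₀ := rfl
      rw [hg1, pv_replace1_no (hfree p₀ (by simp))]
      have := ih [p₀] hfree (by simp) (by simp)
      rw [hg1] at this
      simpa [pvFill] using this
    | cons p₁ rest =>
      simp only [List.foldl_cons]
      rw [pv_glue_cons₂, pv_replace1_step (hfree p₀ (by simp))]
      have hg : p₀ ++ w ++ pvGlue (p₁ :: rest) = pvGlue ((p₀ ++ w ++ p₁) :: rest) := by
        cases rest with
        | nil => simp [pvGlue]
        | cons p₂ r2 => rw [pv_glue_cons₂, pv_glue_cons₂]; simp [List.append_assoc]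
      rw [hg]
      cases ws with
      | nil =>
        -- w was the last replace: nothing can consume an occurrence it may create
        rw [List.foldl_nil, pv_glue_fill]
        simp [pvFill, List.append_assoc]
      | cons v ws' =>
        have hsafe_w : pvSafeWordP w := by
          refine hsafe w ?_
          rw [List.dropLast_cons₂]
          simp
        have hfree' : ∀ p ∈ (p₀ ++ w ++ p₁) :: rest, ¬ pvVAR <:+: p := by
          intro p hp
          rcases List.mem_cons.mp hp with rfl | hp'
          · exact pv_safe_glue (hfree p₀ (by simp)) (hfree p₁ (by simp)) hsafe_w
          · exact hfree p (by simp [hp'])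
        have hsafe' : ∀ u ∈ (v :: ws').dropLast.take (((p₀ ++ w ++ p₁) :: rest).length - 1),
            pvSafeWordP u := by
          intro u hu
          refine hsafe u ?_
          rw [List.dropLast_cons₂]
          simp only [List.length_cons, Nat.add_sub_cancel] at hu ⊢
          rw [List.take_succ_cons]
          exact List.mem_cons_of_mem _ hu
        rw [ih _ hfree' (by simp) hsafe']
        simp [pvFill, List.append_assoc]

-- ===== VERDICT (by name: the statement is the Claim_ definition above) =====
theorem construct_dominant_phrases_spec : Claim_equal_construct_dominant_phrases := by
  unfold Claim_equal_construct_dominant_phrases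
  intro phrase terms _ hpre
  unfold Spec_construct_dominant_phrases construct_dominant_phrases construct_dominant_phrases_alt
  simp only [List.nil_append, PySem.List.foldl_append_singleton_eq_map]
  refine List.map_congr_left ?_
  intro term hterm
  have hsp := pv_sp_spec phrase.toList
  have hfold := pv_fold_eq (PySem.Chars.splitOn term.toList [' ']) (pvSp phrase.toList)
      hsp.2.1 (pv_sp_ne_nil _)
      (fun w hw => pv_safeWord_prop
        (hpre term hterm w (by rw [pv_splitOn_eq_sp]; exact hw)))
  rw [hsp.1] at hfold
  rw [pv_splitOn_eq_sp, hfold]
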